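-- pv_equiv track=rewrite | github.com/tashakim/puzzles_python | searchForPat.py | searchForPattern
-- ===== SOURCE A (Python) =====
-- def searchForPattern(long_string, pattern):
-- 	if pattern == "":
-- 		return "|".join(['0' for x in long_string] + ['0'])
--
-- 	mydict = {} # initialize hash set
--
-- 	for word in long_string:
-- 		mydict[word] = 0 # initialize number of occurrences to 0
-- 		i = 0
-- 		while i < len(word) - len(pattern)+1: # loops through word using a sliding window
-- 			if word[i: i+len(pattern)] == pattern:
-- 				mydict[word] += 1
-- 			i += 1
--
-- 	res = [x for x in mydict.values()]
-- 	res += [sum(res)] # append sum of all occurrences to result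
-- 	return "|".join([str(x) for x in res]) # join result into correct format
-- ===== SOURCE B (Python) =====
-- def _fingerprint_count(word, pattern):
--     # Rabin-Karp with an exact fingerprint: base 0x110000 exceeds every code
--     # point, so equal fingerprints of equal-length windows mean equal strings.
--     # One integer comparison per window instead of a character-by-character slice compare.
--     m = len(pattern)
--     n = len(word)
--     if n < m:
--         return 0
--     B = 0x110000
--     target = 0
--     for ch in pattern:
--         target = target * B + ord(ch)
--     h = 0
--     for ch in word[:m]:
--         h = h * B + ord(ch)
--     count = 1 if h == target else 0
--     top = B ** (m - 1)
--     for i in range(n - m):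
--         h = (h - ord(word[i]) * top) * B + ord(word[i + m])
--         if h == target:
--             count += 1
--     return count
--
--
-- def searchForPattern(long_string, pattern):
--     if pattern == "":
--         return "|".join(["0"] * (len(long_string) + 1))
--     counts = {w: _fingerprint_count(w, pattern) for w in long_string}
--     vals = list(counts.values())
--     return "|".join(str(x) for x in vals + [sum(vals)])
-- ===== Notes on version B (the rewrite author's own statement) =====
-- stated objective: alternative
-- what changed: Replaces the per-index slice-and-compare sliding window by Rabin-Karp with an exact base-0x110000 rolling fingerprint: each word is scanned once, maintaining one integer per window that is updated in O(1) big-int steps and compared against the pattern's fingerprint instead of comparing characters.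
import Mathlib
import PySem

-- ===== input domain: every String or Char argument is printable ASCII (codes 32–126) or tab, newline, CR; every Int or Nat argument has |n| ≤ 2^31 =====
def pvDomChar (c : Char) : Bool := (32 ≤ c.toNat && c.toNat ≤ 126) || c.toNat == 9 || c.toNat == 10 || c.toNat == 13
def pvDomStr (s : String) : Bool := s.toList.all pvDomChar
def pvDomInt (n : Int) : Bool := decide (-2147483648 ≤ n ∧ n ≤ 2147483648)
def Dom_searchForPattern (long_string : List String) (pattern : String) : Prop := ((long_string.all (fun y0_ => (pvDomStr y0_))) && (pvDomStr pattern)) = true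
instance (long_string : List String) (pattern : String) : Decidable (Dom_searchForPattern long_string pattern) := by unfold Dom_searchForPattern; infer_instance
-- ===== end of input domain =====

-- B replaces A's slice-and-compare sliding window by Rabin-Karp with an exact
-- (base-0x110000) rolling fingerprint: one integer update and compare per window
-- instead of a character-by-character slice comparison (objective: alternative).

-- ===== PORT A =====
def searchForPattern (long_string : List String) (pattern : String) : String :=
  if pattern == "" then
    PySem.Str.join "|" ((long_string.map (fun _ => "0")) ++ ["0"])
  else
    let mydict := long_string.foldl (fun (d : PySem.Dict String Int) word =>
      let d := d.insert word 0
      -- 'i = 0; while i < len(word) - len(pattern) + 1: … i += 1' as a fold over range(0, bound)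
      (PySem.List.pyRange 0 ((word.toList.length : Int) - (pattern.toList.length : Int) + 1) 1).foldl
        (fun d i =>
          if PySem.Chars.slice word.toList (some i) (some (i + (pattern.toList.length : Int))) = pattern.toList
          then d.insert word (d.getD word 0 + 1) else d) d) PySem.Dict.empty
    let res := mydict.values
    let res := res ++ [res.sum]
    PySem.Str.join "|" (res.map (fun x => PySem.Int.toStr x))

-- ===== PORT B =====
-- transliteration of Source B's _fingerprint_count: target/h are built by the two
-- 'for ch in …' folds, then the 'for i in range(n - m)' loop rolls the hash.
def pvFingerprintCount (w p : List Char) : Int :=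
  let m := p.length
  let n := w.length
  if n < m then 0
  else
    let target : Int := p.foldl (fun a c => a * 1114112 + (c.toNat : Int)) 0
    let h : Int := (PySem.List.slice w none (some (m : Int))).foldl
      (fun a c => a * 1114112 + (c.toNat : Int)) 0
    let count : Int := if h = target then 1 else 0
    let top : Int := (1114112 : Int) ^ (m - 1)
    ((PySem.List.pyRange 0 ((n : Int) - (m : Int)) 1).foldl
      (fun (s : Int × Int) i =>
        let h' := (s.1 - (((PySem.List.pyGet? w i).map (fun c => (c.toNat : Int))).getD 0) * top) * 1114112
                  + (((PySem.List.pyGet? w (i + (m : Int))).map (fun c => (c.toNat : Int))).getD 0)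
        (h', if h' = target then s.2 + 1 else s.2)) (h, count)).2

def searchForPattern_alt (long_string : List String) (pattern : String) : String :=
  if pattern == "" then
    PySem.Str.join "|" (List.replicate (long_string.length + 1) "0")
  else
    let counts := long_string.foldl (fun (d : PySem.Dict String Int) w =>
      d.insert w (pvFingerprintCount w.toList pattern.toList)) PySem.Dict.empty
    let vals := counts.values
    PySem.Str.join "|" ((vals ++ [vals.sum]).map (fun x => PySem.Int.toStr x))

-- ===== PRECONDITION & SPEC =====
def Spec_searchForPattern (long_string : List String) (pattern : String) (out : String) : Prop := out = searchForPattern_alt long_string pattern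
instance (long_string : List String) (pattern : String) (out : String) : Decidable (Spec_searchForPattern long_string pattern out) := by unfold Spec_searchForPattern; infer_instance

-- ===== CLAIM (what is proved, stated in full; the proofs are below) =====
def Claim_equal_searchForPattern : Prop := ∀ (long_string : List String) (pattern : String), Dom_searchForPattern long_string pattern → Spec_searchForPattern long_string pattern (searchForPattern long_string pattern)

-- ===== LEMMAS AND PROOFS =====

-- the naive count: at how many start indices does p occur in w
def pvQ (w p : List Char) (i : Nat) : Bool := decide ((w.drop i).take p.length = p)
def pvN (w p : List Char) : Nat := (List.range (w.length + 1 - p.length)).countP (pvQ w p)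

-- the fingerprint as a Nat (the ports compute its Int cast)
def pvFpN (l : List Char) : Nat := l.foldl (fun a c => a * 1114112 + c.toNat) 0

theorem pvChar_lt (c : Char) : c.toNat < 1114112 := by
  have h := c.valid
  unfold Char.toNat
  rcases h with h | ⟨h1, h2⟩ <;> omega

theorem pvFpN_go (l : List Char) : ∀ a : Nat,
    l.foldl (fun a c => a * 1114112 + c.toNat) a = a * 1114112 ^ l.length + pvFpN l := by
  induction l with
  | nil => intro a; simp [pvFpN]
  | cons c l ih =>
    intro a
    simp only [pvFpN, List.foldl_cons, List.length_cons]
    rw [ih (a * 1114112 + c.toNat), ih (0 * 1114112 + c.toNat)]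
    ring

theorem pvFpN_cons (c : Char) (l : List Char) :
    pvFpN (c :: l) = c.toNat * 1114112 ^ l.length + pvFpN l := by
  rw [pvFpN, List.foldl_cons, pvFpN_go]
  ring_nf

theorem pvFpN_append_singleton (l : List Char) (c : Char) :
    pvFpN (l ++ [c]) = pvFpN l * 1114112 + c.toNat := by
  simp [pvFpN, List.foldl_append]

theorem pvFpN_go_int (l : List Char) : ∀ a : Int,
    l.foldl (fun a c => a * 1114112 + (c.toNat : Int)) a
      = a * 1114112 ^ l.length + (pvFpN l : Int) := by
  induction l with
  | nil => intro a; simp [pvFpN]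
  | cons c l ih =>
    intro a
    simp only [List.foldl_cons, List.length_cons]
    rw [ih, pvFpN_cons]
    push_cast
    ring

theorem pvFpN_lt (l : List Char) : pvFpN l < 1114112 ^ l.length := by
  induction l with
  | nil => simp [pvFpN]
  | cons c l ih =>
    rw [pvFpN_cons, List.length_cons, pow_succ]
    have hc := pvChar_lt c
    calc c.toNat * 1114112 ^ l.length + pvFpN l
        < c.toNat * 1114112 ^ l.length + 1114112 ^ l.length := by omega
      _ = (c.toNat + 1) * 1114112 ^ l.length := by ring
      _ ≤ 1114112 * 1114112 ^ l.length := by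
          exact Nat.mul_le_mul_right _ (by omega)
      _ = 1114112 ^ l.length * 1114112 := by ring

theorem pvFpN_inj : ∀ (u v : List Char), u.length = v.length → pvFpN u = pvFpN v → u = v := by
  intro u
  induction u with
  | nil => intro v h _; exact (List.eq_nil_of_length_eq_zero h.symm).symm
  | cons c u ih =>
    intro v h hfp
    cases v with
    | nil => simp at h
    | cons c' v =>
      simp only [List.length_cons, Nat.add_right_cancel_iff] at h
      rw [pvFpN_cons, pvFpN_cons, h] at hfp
      have h1 := pvFpN_lt u
      have h2 := pvFpN_lt v
      rw [h] at h1
      have hcc : c.toNat = c'.toNat ∧ pvFpN u = pvFpN v := by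
        set K := 1114112 ^ v.length with hK
        rcases Nat.lt_trichotomy c.toNat c'.toNat with hlt | heq | hgt
        · exfalso
          have hstep : c.toNat * K + K ≤ c'.toNat * K := by
            have h' : (c.toNat + 1) * K ≤ c'.toNat * K := Nat.mul_le_mul_right _ (by omega)
            rw [Nat.add_mul, one_mul] at h'
            exact h'
          omega
        · constructor
          · exact heq
          · rw [heq] at hfp; omega
        · exfalso
          have hstep : c'.toNat * K + K ≤ c.toNat * K := by
            have h' : (c'.toNat + 1) * K ≤ c.toNat * K := Nat.mul_le_mul_right _ (by omega)
            rw [Nat.add_mul, one_mul] at h'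
            exact h'
          omega
      have hc : c = c' := by
        apply Char.ext
        unfold Char.toNat at hcc
        exact UInt32.toNat_inj.mp hcc.1
      rw [hc, ih v h hcc.2]

theorem pvFp_eq_iff (u v : List Char) (h : u.length = v.length) :
    pvFpN u = pvFpN v ↔ u = v :=
  ⟨pvFpN_inj u v h, fun h' => by rw [h']⟩

-- the rolling-hash step: from the fingerprint of window a to that of window a+1
theorem pvRollStep (w p : List Char) (a : Nat) (hm : 0 < p.length)
    (h : a + p.length < w.length) :
    ((pvFpN ((w.drop a).take p.length) : Int)
        - ((w[a]'(by omega)).toNat : Int) * (1114112 : Int) ^ (p.length - 1)) * 1114112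
      + ((w[a + p.length]'h).toNat : Int)
      = (pvFpN ((w.drop (a + 1)).take p.length) : Int) := by
  have hwa : w.drop a = w[a]'(by omega) :: w.drop (a + 1) :=
    List.drop_eq_getElem_cons (by omega)
  have hwin : (w.drop a).take p.length = w[a]'(by omega) :: (w.drop (a + 1)).take (p.length - 1) := by
    rw [hwa]
    conv_lhs => rw [show p.length = (p.length - 1) + 1 by omega]
    rw [List.take_succ_cons]
  have hmidlen : ((w.drop (a + 1)).take (p.length - 1)).length = p.length - 1 := by
    rw [List.length_take, List.length_drop]
    omega
  have hwin1 : (w.drop (a + 1)).take p.length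
      = (w.drop (a + 1)).take (p.length - 1) ++ [w[a + p.length]'h] := by
    conv_lhs => rw [show p.length = (p.length - 1) + 1 by omega]
    rw [List.take_add_one]
    have hidx : (w.drop (a + 1))[p.length - 1]? = some (w[a + p.length]'h) := by
      rw [List.getElem?_drop]
      have heq : a + 1 + (p.length - 1) = a + p.length := by omega
      rw [heq, List.getElem?_eq_getElem h]
    rw [hidx]
    rfl
  rw [hwin, hwin1, pvFpN_cons, pvFpN_append_singleton, hmidlen]
  push_cast
  ring

-- the rolled fold computes the fingerprint of the last window and counts hits among windows a+1 .. a+k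
theorem pvRoll (w p : List Char) (hm : 0 < p.length) :
    ∀ (k a : Nat) (c : Int), a + k + p.length ≤ w.length →
    (List.range' a k).foldl
      (fun (s : Int × Int) (j : Nat) => (fun (i : Int) =>
        ((s.1 - (((PySem.List.pyGet? w i).map (fun c => (c.toNat : Int))).getD 0)
            * (1114112 : Int) ^ (p.length - 1)) * 1114112
          + (((PySem.List.pyGet? w (i + (p.length : Int))).map (fun c => (c.toNat : Int))).getD 0),
         if (s.1 - (((PySem.List.pyGet? w i).map (fun c => (c.toNat : Int))).getD 0)
              * (1114112 : Int) ^ (p.length - 1)) * 1114112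
            + (((PySem.List.pyGet? w (i + (p.length : Int))).map (fun c => (c.toNat : Int))).getD 0)
            = (pvFpN p : Int)
         then s.2 + 1 else s.2)) (j : Int))
      ((pvFpN ((w.drop a).take p.length) : Int), c)
    = ((pvFpN ((w.drop (a + k)).take p.length) : Int),
        c + ((List.range' (a + 1) k).countP (fun j => decide (pvFpN ((w.drop j).take p.length) = pvFpN p)) : Int)) := by
  intro k
  induction k with
  | zero => intro a c _; simp
  | succ k ih =>
    intro a c hle
    rw [List.range'_succ, List.foldl_cons]
    simp only []
    have hlt : a + p.length < w.length := by omega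
    have hget1 : PySem.List.pyGet? w ((a : Nat) : Int) = some (w[a]'(by omega)) := by
      rw [PySem.List.pyGet?_natCast, List.getElem?_eq_getElem (by omega)]
    have hget2 : PySem.List.pyGet? w (((a : Nat) : Int) + (p.length : Int)) = some (w[a + p.length]'hlt) := by
      have hc : ((a : Nat) : Int) + (p.length : Int) = ((a + p.length : Nat) : Int) := by push_cast; ring
      rw [hc, PySem.List.pyGet?_natCast, List.getElem?_eq_getElem hlt]
    simp only [hget1, hget2, Option.map_some, Option.getD_some]
    rw [pvRollStep w p a hm hlt]
    rw [ih (a + 1) _ (by omega)]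
    rw [List.range'_succ, List.countP_cons]
    rw [show a + 1 + k = a + (k + 1) by omega]
    refine Prod.ext_iff.mpr ⟨rfl, ?_⟩
    by_cases hhit : pvFpN ((w.drop (a + 1)).take p.length) = pvFpN p
    · have hcast : (pvFpN ((w.drop (a + 1)).take p.length) : Int) = (pvFpN p : Int) := by
        exact_mod_cast hhit
      rw [if_pos hcast]
      simp only [hhit, decide_true]
      push_cast
      ring
    · have hcast : (pvFpN ((w.drop (a + 1)).take p.length) : Int) ≠ (pvFpN p : Int) := by
        exact_mod_cast hhit
      rw [if_neg hcast]
      simp only [hhit, decide_false]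
      push_cast
      ring

-- B's per-word fingerprint count equals the naive count
theorem pvFingerprintCount_eq (w p : List Char) (hp : p ≠ []) :
    pvFingerprintCount w p = (pvN w p : Int) := by
  have hm : 0 < p.length := List.length_pos_of_ne_nil hp
  unfold pvFingerprintCount
  simp only []
  by_cases hlt : w.length < p.length
  · rw [if_pos hlt]
    unfold pvN
    rw [show w.length + 1 - p.length = 0 by omega]
    simp
  · rw [if_neg hlt]
    have hmn : p.length ≤ w.length := by omega
    have hcastrange : (w.length : Int) - (p.length : Int) = ((w.length - p.length : Nat) : Int) := by
      omega
    rw [PySem.List.slice_to_natCast w p.length]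
    rw [hcastrange, PySem.List.pyRange_zero_natCast]
    rw [pvFpN_go_int p 0, pvFpN_go_int (w.take p.length) 0]
    simp only [zero_mul, zero_add]
    have hroll := pvRoll w p hm (w.length - p.length) 0
      (if (pvFpN (w.take p.length) : Int) = (pvFpN p : Int) then 1 else 0) (by omega)
    simp only [List.drop_zero, Nat.zero_add] at hroll
    rw [List.foldl_map, List.range_eq_range', hroll]
    have hq_iff : ∀ j, j ≤ w.length - p.length →
        (pvQ w p j = true ↔ pvFpN ((w.drop j).take p.length) = pvFpN p) := by
      intro j hj
      have hlen : ((w.drop j).take p.length).length = p.length := by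
        rw [List.length_take, List.length_drop]
        omega
      rw [pvQ, decide_eq_true_iff, ← pvFp_eq_iff _ _ hlen]
    unfold pvN
    rw [show w.length + 1 - p.length = (w.length - p.length) + 1 by omega]
    rw [List.range_eq_range', List.range'_succ, List.countP_cons]
    have hcong : (List.range' (0 + 1) (w.length - p.length)).countP
          (fun j => decide (pvFpN ((w.drop j).take p.length) = pvFpN p))
        = (List.range' (0 + 1) (w.length - p.length)).countP (pvQ w p) := by
      apply List.countP_congr
      intro j hj
      have hjle : j ≤ w.length - p.length := by
        have := List.mem_range'.mp hj
        omega
      simp only [decide_eq_true_eq]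
      constructor
      · intro h; exact (hq_iff j hjle).mpr h
      · intro h; exact (hq_iff j hjle).mp h
    rw [hcong]
    have h0 : (pvQ w p 0 = true) ↔ ((pvFpN (w.take p.length) : Int) = (pvFpN p : Int)) := by
      rw [hq_iff 0 (by omega)]
      simp only [List.drop_zero]
      exact ⟨fun h => by exact_mod_cast h, fun h => by exact_mod_cast h⟩
    by_cases hz : pvQ w p 0 = true
    · rw [if_pos (h0.mp hz), hz]
      simp only [if_true]
      push_cast; ring
    · rw [if_neg (fun h => hz (h0.mpr h))]
      simp only [Bool.not_eq_true] at hz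
      rw [hz]
      simp only [Bool.false_eq_true, if_false]
      push_cast; ring

-- the inner fold of A: repeated 'mydict[word] += 1' collapses to one insert of the count
theorem pvInnerFold (P : Int → Prop) [DecidablePred P] (L : List Int) :
    ∀ (d : PySem.Dict String Int) (w : String) (c : Int),
    L.foldl (fun d i => if P i then d.insert w (d.getD w 0 + 1) else d) (d.insert w c)
      = d.insert w (c + (L.countP (fun i => decide (P i)) : Int)) := by
  induction L with
  | nil => intro d w c; simp
  | cons a L ih =>
    intro d w c
    simp only [List.foldl_cons, List.countP_cons]
    by_cases hPa : P a
    · rw [if_pos hPa, PySem.Dict.getD_insert_self, PySem.Dict.insert_insert_self, ih]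
      simp [hPa]
      congr 1
      omega
    · rw [if_neg hPa, ih]
      simp [hPa]

-- A's per-word range-of-slices count equals the naive count
theorem pvRangeCount (w p : List Char) :
    (PySem.List.pyRange 0 ((w.length : Int) - (p.length : Int) + 1) 1).countP
        (fun i => decide (PySem.Chars.slice w (some i) (some (i + (p.length : Int))) = p))
      = pvN w p := by
  by_cases hm : p.length ≤ w.length
  · have hb : ((w.length : Int) - (p.length : Int) + 1) = ((w.length - p.length + 1 : Nat) : Int) := by
      push_cast [hm]; ring
    rw [hb, PySem.List.pyRange_zero_natCast, List.countP_map]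
    unfold pvN
    have hr : w.length - p.length + 1 = w.length + 1 - p.length := by omega
    rw [hr]
    apply List.countP_congr
    intro i _
    simp [pvQ, Function.comp, PySem.Chars.slice_eq_listSlice, PySem.List.slice_natCast_add]
  · have hempty : PySem.List.pyRange 0 ((w.length : Int) - (p.length : Int) + 1) 1 = [] := by
      rw [PySem.List.pyRange_of_pos 0 _ (by omega : (0:Int) < 1)]
      rw [if_neg (by omega : ¬ ((0:Int) < (w.length : Int) - (p.length : Int) + 1))]
      simp
    rw [hempty]
    unfold pvN
    have : w.length + 1 - p.length = 0 := by omega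
    rw [this]
    simp

theorem pvStringNeNil {s : String} (h : ¬ s = "") : s.toList ≠ [] :=
  fun hl => h (String.toList_eq_nil_iff.1 hl)

-- ===== VERDICT (by name: the statement is the Claim_ definition above) =====
theorem searchForPattern_spec : Claim_equal_searchForPattern := by
  intro ls pat _
  unfold Spec_searchForPattern searchForPattern searchForPattern_alt
  by_cases hpat : pat == ""
  · rw [if_pos hpat, if_pos hpat]
    congr 1
    rw [List.map_const', ← List.replicate_succ']
  · rw [if_neg hpat, if_neg hpat]
    have hpnil : pat.toList ≠ [] := pvStringNeNil (by simpa using hpat)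
    have hstep : (fun (d : PySem.Dict String Int) word =>
        (PySem.List.pyRange 0 ((word.toList.length : Int) - (pat.toList.length : Int) + 1) 1).foldl
          (fun d i =>
            if PySem.Chars.slice word.toList (some i) (some (i + (pat.toList.length : Int))) = pat.toList
            then d.insert word (d.getD word 0 + 1) else d) (d.insert word 0))
        = (fun (d : PySem.Dict String Int) word =>
            d.insert word (pvFingerprintCount word.toList pat.toList)) := by
      funext d word
      rw [pvInnerFold (fun i =>
          PySem.Chars.slice word.toList (some i) (some (i + (pat.toList.length : Int))) = pat.toList)]
      rw [pvRangeCount word.toList pat.toList, pvFingerprintCount_eq word.toList pat.toList hpnil]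
      simp
    simp only []
    rw [hstep]
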